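-- pv_equiv track=rewrite | github.com/durgapradeepch/Anomaly-Analysis | engine.py | count_aligned_bursts
-- ===== SOURCE A (Python) =====
-- from typing import Dict, List, Optional, Tuple
--
-- def count_aligned_bursts(bursts1: List[int], bursts2: List[int], alignment_window_ms: int = 120000) -> int:
--     """
--     Count bursts that occur within alignment window of each other.
--
--     Args:
--         bursts1: List of burst timestamps for series 1
--         bursts2: List of burst timestamps for series 2
--         alignment_window_ms: Alignment window in milliseconds (default: 2 minutes)
--
--     Returns:
--         Number of aligned bursts
--     """
--     if not bursts1 or not bursts2:
--         return 0
--
--     aligned_count = 0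
--     used_bursts2 = set()  # Avoid double-counting
--
--     for burst1_ts in bursts1:
--         for burst2_ts in bursts2:
--             if burst2_ts in used_bursts2:
--                 continue
--
--             # Check if bursts are within alignment window
--             if abs(burst1_ts - burst2_ts) <= alignment_window_ms:
--                 aligned_count += 1
--                 used_bursts2.add(burst2_ts)
--                 break  # Move to next burst1, avoid multiple matches
--
--     return aligned_count
-- ===== SOURCE B (Python) =====
-- from typing import List
--
--
-- def _without_first_match(candidates: List[int], ts: int, window: int):
--     """Candidates with the first one within window of ts removed, or None if no match."""
--     for k, t in enumerate(candidates):
--         if abs(ts - t) <= window: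
--             return candidates[:k] + candidates[k + 1:]
--     return None
--
--
-- def count_aligned_bursts(bursts1: List[int], bursts2: List[int], alignment_window_ms: int = 120000) -> int:
--     # Distinct timestamps of bursts2 in first-occurrence order; matching is by value,
--     # so each distinct timestamp can be matched at most once.
--     candidates = list(dict.fromkeys(bursts2))
--     count = 0
--     for ts in bursts1:
--         remaining = _without_first_match(candidates, ts, alignment_window_ms)
--         if remaining is not None:
--             candidates = remaining
--             count += 1
--     return count
-- ===== Notes on version B (the rewrite author's own statement) =====
-- stated objective: faster
-- what changed: B dedupes bursts2 once up front and threads a shrinking candidate list from which each matched timestamp is physically removed, instead of A's rescanning all of bursts2 for every burst1 while skipping members of a growing used-set.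
import Mathlib
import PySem

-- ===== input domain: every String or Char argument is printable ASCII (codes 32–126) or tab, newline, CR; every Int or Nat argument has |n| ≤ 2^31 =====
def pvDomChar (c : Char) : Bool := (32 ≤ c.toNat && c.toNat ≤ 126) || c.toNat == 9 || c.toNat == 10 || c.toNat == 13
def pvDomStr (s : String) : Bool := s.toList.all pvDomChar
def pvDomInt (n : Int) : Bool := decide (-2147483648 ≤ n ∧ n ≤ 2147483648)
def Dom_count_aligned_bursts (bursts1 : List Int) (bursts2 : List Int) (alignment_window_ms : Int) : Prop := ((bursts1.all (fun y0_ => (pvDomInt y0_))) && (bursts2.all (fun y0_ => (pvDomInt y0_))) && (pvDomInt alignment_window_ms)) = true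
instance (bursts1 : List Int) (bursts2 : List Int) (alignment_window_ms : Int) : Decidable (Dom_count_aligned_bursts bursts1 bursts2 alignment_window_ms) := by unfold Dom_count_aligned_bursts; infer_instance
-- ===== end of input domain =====

-- B dedupes bursts2 once and threads a shrinking candidate list (matched timestamps removed)
-- instead of A's rescan of all of bursts2 per burst1 with a growing used-set (measured faster in a timing run).

-- ===== PORT A =====
-- inner 'for burst2_ts in bursts2' loop with continue/break, over the state (aligned_count, used_bursts2)
def pvScanA (alignment_window_ms : Int) (burst1_ts : Int) : List Int → Int × PySem.Set Int → Int × PySem.Set Int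
  | [], st => st
  | burst2_ts :: rest, st =>
    if PySem.Set.contains st.2 burst2_ts then pvScanA alignment_window_ms burst1_ts rest st
    else if |burst1_ts - burst2_ts| ≤ alignment_window_ms then (st.1 + 1, PySem.Set.add st.2 burst2_ts)
    else pvScanA alignment_window_ms burst1_ts rest st

def count_aligned_bursts (bursts1 : List Int) (bursts2 : List Int) (alignment_window_ms : Int) : Int :=
  if bursts1 = [] ∨ bursts2 = [] then 0
  else (bursts1.foldl (fun st burst1_ts => pvScanA alignment_window_ms burst1_ts bursts2 st)
        ((0 : Int), PySem.Set.empty)).1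

-- ===== PORT B =====
-- _without_first_match: candidates with the first one within window of ts removed, or none
def pvWithoutFirstMatch (ts window : Int) : List Int → Option (List Int)
  | [] => none
  | t :: rest =>
    if |ts - t| ≤ window then some rest
    else (pvWithoutFirstMatch ts window rest).map (fun l => t :: l)

-- body of B's 'for ts in bursts1' loop over the state (count, candidates)
def pvStepB (alignment_window_ms : Int) (st : Int × List Int) (ts : Int) : Int × List Int :=
  match pvWithoutFirstMatch ts alignment_window_ms st.2 with
  | some remaining => (st.1 + 1, remaining)
  | none => st

def count_aligned_bursts_alt (bursts1 : List Int) (bursts2 : List Int) (alignment_window_ms : Int) : Int :=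
  (bursts1.foldl (pvStepB alignment_window_ms) ((0 : Int), PySem.List.dedup bursts2)).1

-- ===== PRECONDITION & SPEC =====
def Spec_count_aligned_bursts (bursts1 : List Int) (bursts2 : List Int) (alignment_window_ms : Int) (out : Int) : Prop := out = count_aligned_bursts_alt bursts1 bursts2 alignment_window_ms
instance (bursts1 : List Int) (bursts2 : List Int) (alignment_window_ms : Int) (out : Int) : Decidable (Spec_count_aligned_bursts bursts1 bursts2 alignment_window_ms out) := by unfold Spec_count_aligned_bursts; infer_instance

-- ===== CLAIM (what is proved, stated in full; the proofs are below) =====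
def Claim_equal_count_aligned_bursts : Prop := ∀ (bursts1 : List Int) (bursts2 : List Int) (alignment_window_ms : Int), Dom_count_aligned_bursts bursts1 bursts2 alignment_window_ms → Spec_count_aligned_bursts bursts1 bursts2 alignment_window_ms (count_aligned_bursts bursts1 bursts2 alignment_window_ms)

-- ===== LEMMAS AND PROOFS =====

-- A's inner scan finds the first not-yet-used timestamp within the window
theorem pvScanA_eq (w b : Int) : ∀ (l : List Int) (c : Int) (used : PySem.Set Int),
    pvScanA w b l (c, used) =
      match l.find? (fun t => !PySem.Set.contains used t && decide (|b - t| ≤ w)) with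
      | some t => (c + 1, PySem.Set.add used t)
      | none => (c, used) := by
  intro l
  induction l with
  | nil => intro c used; rfl
  | cons t rest ih =>
    intro c used
    by_cases hc : t ∈ used <;> by_cases hw : |b - t| ≤ w <;>
      simp [pvScanA, List.find?, hc, hw, ih]

-- B's helper, on a duplicate-free list, removes exactly the first match (by value)
theorem pvWithoutFirstMatch_eq (b w : Int) : ∀ (L : List Int), L.Nodup →
    pvWithoutFirstMatch b w L =
      (L.find? (fun t => decide (|b - t| ≤ w))).map (fun t => L.filter (fun x => !(x == t))) := by
  intro L
  induction L with
  | nil => intro _; rfl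
  | cons t rest ih =>
    intro hnd
    have hnr : rest.Nodup := hnd.of_cons
    have htr : t ∉ rest := by simp_all
    by_cases hw : |b - t| ≤ w
    · have hrest : rest.filter (fun x => !(x == t)) = rest :=
        List.filter_eq_self.mpr (fun a ha => by simp; exact fun h => htr (h ▸ ha))
      simp [pvWithoutFirstMatch, List.find?, hw, hrest]
    · cases hf : rest.find? (fun t => decide (|b - t| ≤ w)) with
      | none => simp [pvWithoutFirstMatch, List.find?, hw, ih hnr, hf]
      | some t' =>
        have ht' : t' ∈ rest := List.mem_of_find?_eq_some hf
        have hne : (t == t') = false := by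
          simp; exact fun h => htr (h ▸ ht')
        simp [pvWithoutFirstMatch, List.find?, hw, ih hnr, hf, hne]

-- ordered dedup with an explicit seen accumulator (proof-only view of PySem.List.dedup)
def pvDedupFrom (s : List Int) : List Int → List Int
  | [] => []
  | x :: xs => if x ∈ s then pvDedupFrom s xs else x :: pvDedupFrom (x :: s) xs

theorem pvDedupFrom_congr : ∀ (xs s s' : List Int), (∀ a, a ∈ s ↔ a ∈ s') →
    pvDedupFrom s xs = pvDedupFrom s' xs := by
  intro xs
  induction xs with
  | nil => intro _ _ _; rfl
  | cons x xs ih =>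
    intro s s' h
    by_cases hx : x ∈ s
    · simp [pvDedupFrom, hx, (h x).mp hx, ih s s' h]
    · have hx' : x ∉ s' := fun hh => hx ((h x).mpr hh)
      simp only [pvDedupFrom, if_neg hx, if_neg hx']
      exact congrArg _ (ih _ _ (fun a => by simp [h a]))

theorem pvFoldl_add_eq (xs : List Int) : ∀ (s : PySem.Set Int),
    xs.foldl PySem.Set.add s = s ++ pvDedupFrom s xs := by
  induction xs with
  | nil => intro s; simp [pvDedupFrom]
  | cons x xs ih =>
    intro s
    by_cases hx : x ∈ s
    · simp [List.foldl_cons, PySem.Set.add_of_mem hx, pvDedupFrom, hx, ih]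
    · simp only [List.foldl_cons, PySem.Set.add_of_not_mem hx, pvDedupFrom, if_neg hx, ih]
      rw [pvDedupFrom_congr xs (s ++ [x]) (x :: s) (fun a => by simp; tauto)]
      simp

theorem pvDedup_eq_dedupFrom (xs : List Int) : PySem.List.dedup xs = pvDedupFrom [] xs := by
  have h := pvFoldl_add_eq xs []
  simpa [PySem.List.dedup_eq_ofList, PySem.Set.ofList_eq_foldl] using h

-- dedup does not change the first element satisfying a predicate
theorem pvFind?_dedupFrom (r : Int → Bool) : ∀ (xs s : List Int), (∀ a ∈ s, r a = false) →
    (pvDedupFrom s xs).find? r = xs.find? r := by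
  intro xs
  induction xs with
  | nil => intro _ _; rfl
  | cons x xs ih =>
    intro s hs
    by_cases hx : x ∈ s
    · simp [pvDedupFrom, hx, ih s hs, List.find?, hs x hx]
    · cases hr : r x with
      | true => simp [pvDedupFrom, hx, List.find?, hr]
      | false =>
        simp only [pvDedupFrom, if_neg hx, List.find?, hr]
        refine ih (x :: s) ?_
        intro a ha
        rcases List.mem_cons.mp ha with h | h
        · exact h ▸ hr
        · exact hs a h

theorem pvFind?_dedup (r : Int → Bool) (xs : List Int) :
    (PySem.List.dedup xs).find? r = xs.find? r := by
  rw [pvDedup_eq_dedupFrom]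
  exact pvFind?_dedupFrom r xs [] (by simp)

theorem pvFind?_filter (l : List Int) (p q : Int → Bool) :
    (l.filter q).find? p = l.find? (fun x => q x && p x) := by
  induction l with
  | nil => rfl
  | cons x xs ih => by_cases h : q x = true <;> by_cases h2 : p x = true <;>
      simp [List.find?, h, h2, ih]

theorem pvContains_add (used : PySem.Set Int) (t x : Int) :
    PySem.Set.contains (PySem.Set.add used t) x = (PySem.Set.contains used x || x == t) := by
  rw [Bool.eq_iff_iff]
  simp [PySem.Set.mem_add]

-- the main loop invariant: B's candidate list is the deduped bursts2 minus A's used set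
theorem pvLoop_eq (w : Int) (b2 : List Int) : ∀ (bs : List Int) (c : Int) (used : PySem.Set Int),
    (bs.foldl (fun st burst1_ts => pvScanA w burst1_ts b2 st) (c, used)).1
    = (bs.foldl (pvStepB w) (c, (PySem.List.dedup b2).filter (fun t => !PySem.Set.contains used t))).1 := by
  intro bs
  induction bs with
  | nil => intro c used; rfl
  | cons b bs ih =>
    intro c used
    have hnd : ((PySem.List.dedup b2).filter (fun t => !PySem.Set.contains used t)).Nodup :=
      (PySem.List.nodup_dedup b2).filter _
    have hfind : ((PySem.List.dedup b2).filter (fun t => !PySem.Set.contains used t)).find?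
        (fun t => decide (|b - t| ≤ w))
        = b2.find? (fun t => !PySem.Set.contains used t && decide (|b - t| ≤ w)) := by
      rw [pvFind?_filter, pvFind?_dedup]
    simp only [List.foldl_cons, pvScanA_eq, pvStepB, pvWithoutFirstMatch_eq b w _ hnd, hfind]
    cases hf : b2.find? (fun t => !PySem.Set.contains used t && decide (|b - t| ≤ w)) with
    | none => simpa using ih c used
    | some t =>
      simp only [Option.map_some]
      have hcand : ((PySem.List.dedup b2).filter (fun t' => !PySem.Set.contains used t')).filter
          (fun x => !(x == t))
          = (PySem.List.dedup b2).filter (fun x => !PySem.Set.contains (PySem.Set.add used t) x) := by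
        rw [List.filter_filter]
        exact List.filter_congr (fun x _ => by rw [pvContains_add]; cases PySem.Set.contains used x <;> simp)
      rw [hcand]
      exact ih (c + 1) (PySem.Set.add used t)

-- with no candidates left, B's loop never changes its state
theorem pvFoldl_stepB_nil (w : Int) : ∀ (bs : List Int) (c : Int),
    bs.foldl (pvStepB w) (c, ([] : List Int)) = (c, []) := by
  intro bs
  induction bs with
  | nil => intro c; rfl
  | cons b bs ih => intro c; simpa [List.foldl_cons, pvStepB, pvWithoutFirstMatch] using ih c

-- ===== VERDICT (by name: the statement is the Claim_ definition above) =====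
theorem count_aligned_bursts_spec : Claim_equal_count_aligned_bursts := by
  intro bursts1 bursts2 w _
  unfold Spec_count_aligned_bursts count_aligned_bursts count_aligned_bursts_alt
  by_cases h : bursts1 = [] ∨ bursts2 = []
  · rw [if_pos h]
    rcases h with h | h
    · subst h; rfl
    · subst h
      have : PySem.List.dedup ([] : List Int) = [] := rfl
      rw [this, pvFoldl_stepB_nil]
  · rw [if_neg h]
    have hempty : ∀ t : Int, PySem.Set.contains (PySem.Set.empty : PySem.Set Int) t = false :=
      fun t => rfl
    have := pvLoop_eq w bursts2 bursts1 0 PySem.Set.empty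
    simpa [hempty] using this
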